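-- pv_equiv track=rewrite | github.com/Kiri-Path/Interview-Question | Q1.py | count_sentences2
-- ===== SOURCE A (Python) =====
-- def count_letters(input_string):
--     letters_to_count = {'S', 'K', 'Y'}
--     count_dict = {}
--
--
--     # first we loop through every character is in the string
--     # if the character is in letters to count, i.e its one of the letters we want to count
--     # then if that value in not in the dictionary assign 1 else incrmeent by 1
--
--     for char in input_string.upper():
--         if char in letters_to_count:
--             if char not in count_dict:
--                 count_dict[char] = 1
--             else:
--                 count_dict[char] += 1
--
--     return count_dict
--
-- def count_sentences2(sentences):
--     count_dict = {}
--     for sent in sentences: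
--
--         #this create a dictionary for sent_count because remember count_letters is a dictionary
--         sent_counts = count_letters(sent)
--
--         # the char and count is the key and value
--
--         for char, count in sent_counts.items():
--
--             # this section now allows us to merge the sentences together.
--             if char not in count_dict:
--                 count_dict[char] = count
--             else:
--                 count_dict[char] += count
--     return count_dict
-- ===== SOURCE B (Python) =====
-- def count_sentences2(sentences):
--     counts = {}
--     for sent in sentences:
--         for ch in sent.upper():
--             if ch in ('S', 'K', 'Y'):
--                 counts[ch] = counts.get(ch, 0) + 1
--     return counts
-- ===== Notes on version B (the rewrite author's own statement) =====
-- stated objective: simpler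
-- what changed: B counts S/K/Y in one flat pass with a single running dict, eliminating A's per-sentence dictionary construction and the separate merge loop.
import Mathlib
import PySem

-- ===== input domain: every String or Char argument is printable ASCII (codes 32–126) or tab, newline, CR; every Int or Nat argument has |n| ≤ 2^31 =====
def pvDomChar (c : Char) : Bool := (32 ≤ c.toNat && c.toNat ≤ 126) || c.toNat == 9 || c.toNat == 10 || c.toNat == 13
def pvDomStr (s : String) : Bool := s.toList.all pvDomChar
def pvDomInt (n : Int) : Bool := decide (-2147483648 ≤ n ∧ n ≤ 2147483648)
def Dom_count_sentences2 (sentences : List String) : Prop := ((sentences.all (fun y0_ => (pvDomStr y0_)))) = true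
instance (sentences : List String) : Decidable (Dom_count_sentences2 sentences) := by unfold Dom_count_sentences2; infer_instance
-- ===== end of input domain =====

-- B replaces A's per-sentence dict + merge loop with one flat counting pass over the qualifying
-- characters; same result, simpler structure (objective: simpler, no speed claim).

-- ===== PORT A =====
-- the literal set {'S', 'K', 'Y'} (used by both Pythons as their membership test)
def pvSKY : List String := ["S", "K", "Y"]

-- helper of A: count_letters
def count_letters (input_string : String) : PySem.Dict String Int :=
  (PySem.Str.upper input_string).toList.foldl (fun count_dict char =>
    let ch := String.mk [char]
    if ch ∈ pvSKY then
      if count_dict.contains ch = false then count_dict.insert ch 1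
      else count_dict.insert ch (count_dict.getD ch 0 + 1)
    else count_dict) PySem.Dict.empty

def count_sentences2 (sentences : List String) : List (String × Int) :=
  (sentences.foldl (fun count_dict sent =>
    (count_letters sent).items.foldl (fun cd p =>
      if cd.contains p.1 = false then cd.insert p.1 p.2
      else cd.insert p.1 (cd.getD p.1 0 + p.2)) count_dict) PySem.Dict.empty).items

-- ===== PORT B =====
def count_sentences2_alt (sentences : List String) : List (String × Int) :=
  (sentences.foldl (fun counts sent =>
    (PySem.Str.upper sent).toList.foldl (fun counts char =>
      let ch := String.mk [char]
      if ch ∈ pvSKY then counts.insert ch (counts.getD ch 0 + 1) else counts) counts) PySem.Dict.empty).items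

-- ===== PRECONDITION & SPEC =====
def Spec_count_sentences2 (sentences : List String) (out : List (String × Int)) : Prop := out = count_sentences2_alt sentences
instance (sentences : List String) (out : List (String × Int)) : Decidable (Spec_count_sentences2 sentences out) := by unfold Spec_count_sentences2; infer_instance

-- ===== CLAIM (what is proved, stated in full; the proofs are below) =====
def Claim_equal_count_sentences2 : Prop := ∀ (sentences : List String), Dom_count_sentences2 sentences → Spec_count_sentences2 sentences (count_sentences2 sentences)

-- ===== LEMMAS AND PROOFS =====

def pvKey (c : Char) : String := String.mk [c]

-- the qualifying keys of a character list, in occurrence order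
def pvLC (cs : List Char) : List String :=
  (cs.filter (fun c => decide (pvKey c ∈ pvSKY))).map pvKey

def pvSumAt (l : List (String × Int)) (k : String) : Int :=
  ((l.filter (fun p => p.1 = k)).map (·.2)).sum

-- B's inner loop is a plain counting fold over the qualifying keys
theorem b_inner_chars :
    ∀ (cs : List Char) (d : PySem.Dict String Int),
    cs.foldl (fun counts char =>
      let ch := String.mk [char]
      if ch ∈ pvSKY then counts.insert ch (counts.getD ch 0 + 1) else counts) d
    = (pvLC cs).foldl (fun d x => d.insert x (d.getD x 0 + 1)) d := by
  intro cs
  induction cs with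
  | nil => intro d; rfl
  | cons c t ih =>
    intro d
    by_cases h : String.mk [c] ∈ pvSKY
    · simp only [List.foldl_cons, pvLC, List.filter_cons, pvKey, h, decide_true, if_pos,
        List.map_cons]
      exact ih _
    · simp only [List.foldl_cons, pvLC, List.filter_cons, pvKey, h, decide_false, if_neg,
        Bool.false_eq_true, not_false_eq_true]
      exact ih _

-- A's inner loop computes the same fold (its not-yet-present branch inserts 1 = 0 + 1)
theorem a_inner_eq (s : String) :
    count_letters s = (pvLC (PySem.Chars.upper s.toList)).foldl
      (fun d x => d.insert x (d.getD x 0 + 1)) PySem.Dict.empty := by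
  unfold count_letters
  rw [show ((PySem.Str.upper s).toList) = PySem.Chars.upper s.toList from PySem.Str.toList_upper s]
  rw [← b_inner_chars (PySem.Chars.upper s.toList) PySem.Dict.empty]
  congr 1
  funext d c
  by_cases hm : String.mk [c] ∈ pvSKY
  · by_cases hc : d.contains (String.mk [c]) = true
    · simp [hm, hc]
    · rw [Bool.not_eq_true] at hc
      simp [hm, hc, PySem.Dict.getD_of_not_contains d 0 hc]
  · simp [hm]

-- the merge step of A, pointwise, is one insert of the summed count
theorem mstep_eq (d : PySem.Dict String Int) (p : String × Int) :
    (if d.contains p.1 = false then d.insert p.1 p.2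
     else d.insert p.1 (d.getD p.1 0 + p.2))
    = d.insert p.1 (d.getD p.1 0 + p.2) := by
  by_cases hc : d.contains p.1 = true
  · simp [hc]
  · rw [Bool.not_eq_true] at hc
    simp [hc, PySem.Dict.getD_of_not_contains d 0 hc]

theorem merge_getD :
    ∀ (l : List (String × Int)) (d : PySem.Dict String Int) (k : String),
    (l.foldl (fun cd p => cd.insert p.1 (cd.getD p.1 0 + p.2)) d).getD k 0
      = d.getD k 0 + pvSumAt l k := by
  intro l
  induction l with
  | nil => intro d k; simp [pvSumAt]
  | cons p t ih =>
    intro d k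
    rw [List.foldl_cons, ih, PySem.Dict.getD_insert]
    by_cases h : k = p.1
    · simp [pvSumAt, h]; ring
    · simp [pvSumAt, h, Ne.symm h]

theorem sumAt_map_keys (g : String → Int) (k0 : String) :
    ∀ (ks : List String), ks.Nodup →
    pvSumAt (ks.map (fun k => (k, g k))) k0 = if k0 ∈ ks then g k0 else 0 := by
  intro ks
  induction ks with
  | nil => intro _; simp [pvSumAt]
  | cons k t ih =>
    intro hnd
    obtain ⟨hk, ht⟩ := List.nodup_cons.mp hnd
    by_cases h : k = k0
    · subst h
      simp only [List.map_cons, pvSumAt, List.filter_cons] at *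
      simp [ih ht, hk]
    · have hdrop : pvSumAt ((k, g k) :: t.map (fun k => (k, g k))) k0
           = pvSumAt (t.map (fun k => (k, g k))) k0 := by
        simp [pvSumAt, h]
      rw [List.map_cons, hdrop, ih ht]
      simp [Ne.symm h]

theorem set_update_ofList {α : Type} [BEq α] [LawfulBEq α] (s : PySem.Set α) (l : List α) :
    PySem.Set.update s (PySem.Set.ofList l) = PySem.Set.update s l := by
  rw [PySem.Set.update_eq_append_filter, PySem.Set.update_eq_append_filter,
      PySem.Set.ofList_ofList]

-- A's per-sentence step (merge count_letters) equals B's per-sentence step on any Nodup-keyed dict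
set_option maxHeartbeats 2000000 in
theorem step_eq (s : String) (d : PySem.Dict String Int) (hnd : d.keys.Nodup) :
    (count_letters s).items.foldl (fun cd p =>
      if cd.contains p.1 = false then cd.insert p.1 p.2
      else cd.insert p.1 (cd.getD p.1 0 + p.2)) d
    = (pvLC (PySem.Chars.upper s.toList)).foldl (fun d x => d.insert x (d.getD x 0 + 1)) d := by
  have hfun : (fun (cd : PySem.Dict String Int) (p : String × Int) =>
      if cd.contains p.1 = false then cd.insert p.1 p.2
      else cd.insert p.1 (cd.getD p.1 0 + p.2))
      = fun cd p => cd.insert p.1 (cd.getD p.1 0 + p.2) := by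
    funext cd p; exact mstep_eq cd p
  rw [hfun]
  have hclB := a_inner_eq s
  have hclnd : (count_letters s).keys.Nodup := by
    rw [hclB]
    exact PySem.Dict.nodup_keys_foldl_insert _ _ PySem.Dict.empty
      (by rw [PySem.Dict.keys_empty]; exact List.nodup_nil)
  have hclkeys : (count_letters s).keys = PySem.Set.ofList (pvLC (PySem.Chars.upper s.toList)) := by
    rw [hclB, PySem.Dict.keys_foldl_insert, PySem.Dict.keys_empty, PySem.Set.update_nil_left]
  have hclgetD : ∀ k, (count_letters s).getD k 0
      = ((pvLC (PySem.Chars.upper s.toList)).count k : Int) := by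
    intro k
    rw [hclB, PySem.Dict.getD_foldl_insert_add_one, PySem.Dict.getD_empty, zero_add]
  have hitems : (count_letters s).items
      = (count_letters s).keys.map (fun k => (k, (count_letters s).getD k 0)) :=
    PySem.Dict.items_eq_map_keys _ hclnd 0
  have hMnd : ((count_letters s).items.foldl
      (fun cd p => cd.insert p.1 (cd.getD p.1 0 + p.2)) d).keys.Nodup :=
    PySem.Dict.nodup_keys_foldl_insert_key _ Prod.fst _ d hnd
  have hLnd : ((pvLC (PySem.Chars.upper s.toList)).foldl
      (fun d x => d.insert x (d.getD x 0 + 1)) d).keys.Nodup :=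
    PySem.Dict.nodup_keys_foldl_insert _ _ d hnd
  have hkeys : ((count_letters s).items.foldl
      (fun cd p => cd.insert p.1 (cd.getD p.1 0 + p.2)) d).keys
      = ((pvLC (PySem.Chars.upper s.toList)).foldl
        (fun d x => d.insert x (d.getD x 0 + 1)) d).keys := by
    rw [PySem.Dict.keys_foldl_insert_key _ Prod.fst _ d, PySem.Dict.keys_foldl_insert _ _ d]
    have hmap : (count_letters s).items.map Prod.fst = (count_letters s).keys := rfl
    rw [hmap, hclkeys, set_update_ofList]
  have hgetD : ∀ k, ((count_letters s).items.foldl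
      (fun cd p => cd.insert p.1 (cd.getD p.1 0 + p.2)) d).getD k 0
      = ((pvLC (PySem.Chars.upper s.toList)).foldl
        (fun d x => d.insert x (d.getD x 0 + 1)) d).getD k 0 := by
    intro k
    rw [merge_getD, PySem.Dict.getD_foldl_insert_add_one]
    congr 1
    rw [hitems, hclkeys, sumAt_map_keys _ k _ (PySem.Set.nodup_ofList _)]
    by_cases hk : k ∈ pvLC (PySem.Chars.upper s.toList)
    · simp [PySem.Set.mem_ofList, hk, hclgetD k]
    · simp [PySem.Set.mem_ofList, hk, List.count_eq_zero_of_not_mem hk]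
  apply PySem.Dict.ext
  rw [PySem.Dict.items_eq_map_keys _ hMnd 0, PySem.Dict.items_eq_map_keys _ hLnd 0, hkeys]
  exact List.map_congr_left (fun k _ => by rw [hgetD k])

theorem outer_eq :
    ∀ (sents : List String) (d : PySem.Dict String Int), d.keys.Nodup →
    sents.foldl (fun count_dict sent =>
      (count_letters sent).items.foldl (fun cd p =>
        if cd.contains p.1 = false then cd.insert p.1 p.2
        else cd.insert p.1 (cd.getD p.1 0 + p.2)) count_dict) d
    = sents.foldl (fun counts sent =>
      (PySem.Str.upper sent).toList.foldl (fun counts char =>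
        let ch := String.mk [char]
        if ch ∈ pvSKY then counts.insert ch (counts.getD ch 0 + 1) else counts) counts) d := by
  intro sents
  induction sents with
  | nil => intro d _; rfl
  | cons s t ih =>
    intro d hnd
    have hb : (PySem.Str.upper s).toList.foldl (fun counts char =>
        let ch := String.mk [char]
        if ch ∈ pvSKY then counts.insert ch (counts.getD ch 0 + 1) else counts) d
        = (pvLC (PySem.Chars.upper s.toList)).foldl (fun d x => d.insert x (d.getD x 0 + 1)) d := by
      rw [show ((PySem.Str.upper s).toList) = PySem.Chars.upper s.toList from PySem.Str.toList_upper s]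
      exact b_inner_chars _ d
    rw [List.foldl_cons, List.foldl_cons, step_eq s d hnd, ← hb]
    exact ih _ (by
      rw [hb]
      exact PySem.Dict.nodup_keys_foldl_insert _ _ d hnd)

-- ===== VERDICT (by name: the statement is the Claim_ definition above) =====
theorem count_sentences2_spec : Claim_equal_count_sentences2 := by
  intro sentences _
  unfold Spec_count_sentences2 count_sentences2 count_sentences2_alt
  rw [outer_eq sentences PySem.Dict.empty
    (by rw [PySem.Dict.keys_empty]; exact List.nodup_nil)]
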